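-- pv_equiv track=rewrite | github.com/Cheng-JY/benchmark-ev-peak-shaving | src/utils/_calculation.py | get_influence_length
-- ===== SOURCE A (Python) =====
-- def get_influence_length(
--     status_load,
--     updated_load,
-- ):
--     diff_ranges = []
--     start = None
--
--     for i in range(len(status_load)):
--         if status_load[i] != updated_load[i]:
--             if start is None:
--                 start = i
--         else:
--             if start is not None:
--                 diff_ranges.append((start, i-1))
--                 start = None
--
--     if start is not None:
--         diff_ranges.append((start, len(status_load)-1))
--
--     lengths = [(t[1]-t[0]+1) for t in diff_ranges]
--     return lengths, diff_ranges
-- ===== SOURCE B (Python) =====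
-- def get_influence_length(
--     status_load,
--     updated_load,
-- ):
--     # build the per-index difference mask, then scan it run by run
--     mask = [a != b for a, b in zip(status_load, updated_load)]
--     n = len(mask)
--     diff_ranges = []
--     i = 0
--     while i < n:
--         if not mask[i]:
--             i += 1
--             continue
--         j = i
--         while j < n and mask[j]:
--             j += 1
--         diff_ranges.append((i, j - 1))
--         i = j + 1
--     lengths = [e - s + 1 for s, e in diff_ranges]
--     return lengths, diff_ranges
-- ===== Notes on version B (the rewrite author's own statement) =====
-- stated objective: idiomatic
-- what changed: Replaced A's start-sentinel state machine (carrying an Optional start plus a trailing flush after the loop) by a build-the-difference-mask-then-scan-runs decomposition: each maximal run of True in the mask yields one range directly, with no carried state and no post-loop fixup.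
import Mathlib
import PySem

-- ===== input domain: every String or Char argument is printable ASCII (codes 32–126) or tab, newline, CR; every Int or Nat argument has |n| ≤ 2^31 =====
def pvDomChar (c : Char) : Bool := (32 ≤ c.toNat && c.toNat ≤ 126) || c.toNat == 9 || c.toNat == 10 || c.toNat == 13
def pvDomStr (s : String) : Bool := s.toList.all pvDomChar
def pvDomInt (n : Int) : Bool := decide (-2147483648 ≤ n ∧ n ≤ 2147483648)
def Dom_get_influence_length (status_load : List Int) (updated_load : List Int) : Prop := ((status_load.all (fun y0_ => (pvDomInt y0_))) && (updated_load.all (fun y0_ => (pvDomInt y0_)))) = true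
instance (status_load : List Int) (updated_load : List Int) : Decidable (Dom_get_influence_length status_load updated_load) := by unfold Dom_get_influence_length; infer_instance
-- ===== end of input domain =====

-- B replaces A's start-sentinel state machine with a difference-mask-then-scan-runs
-- decomposition (same O(n) cost, plainer structure); equivalence is about return values only.

-- ===== PORT A =====
-- one loop step: i is the current index; state = (start, diff_ranges)
def pvAStep (status_load updated_load : List Int)
    (st : Option Int × List (Int × Int)) (i : Int) : Option Int × List (Int × Int) :=
  let sv := (PySem.List.pyGet? status_load i).getD 0   -- in range under Pre_
  let uv := (PySem.List.pyGet? updated_load i).getD 0  -- in range under Pre_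
  if sv ≠ uv then
    match st.1 with
    | none => (some i, st.2)
    | some s0 => (some s0, st.2)
  else
    match st.1 with
    | none => st
    | some s0 => (none, st.2 ++ [(s0, i - 1)])

def get_influence_length (status_load : List Int) (updated_load : List Int) :
    List Int × (List (Int × Int)) :=
  let n : Int := status_load.length
  let res := (PySem.List.pyRange 0 n 1).foldl (pvAStep status_load updated_load) (none, [])
  let diff_ranges :=
    match res.1 with
    | none => res.2
    | some s0 => res.2 ++ [(s0, n - 1)]
  (diff_ranges.map (fun t => t.2 - t.1 + 1), diff_ranges)

-- ===== PORT B =====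
-- scan the mask run by run: i is the absolute index of the head of the remaining mask;
-- a True-run starting at i has (takeWhile of the tail) further Trues, and the scan
-- resumes past the run and the following False (Source B's `i = j + 1`).
-- (fuel = length of the list, a totality device only: each step consumes at least one element)
def pvScanRunsF : Nat → Int → List Bool → List (Int × Int)
  | 0, _, _ => []
  | _ + 1, _, [] => []
  | f + 1, i, false :: rest => pvScanRunsF f (i + 1) rest
  | f + 1, i, true :: rest =>
    let k := (rest.takeWhile id).length
    (i, i + k) :: pvScanRunsF f (i + k + 2) (rest.drop (k + 1))

def pvScanRuns (i : Int) (mask : List Bool) : List (Int × Int) :=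
  pvScanRunsF mask.length i mask

def get_influence_length_alt (status_load : List Int) (updated_load : List Int) :
    List Int × (List (Int × Int)) :=
  let mask := (List.zip status_load updated_load).map (fun p => decide (p.1 ≠ p.2))
  let diff_ranges := pvScanRuns 0 mask
  (diff_ranges.map (fun t => t.2 - t.1 + 1), diff_ranges)

-- ===== PRECONDITION & SPEC =====
-- A indexes updated_load[i] for every i < len(status_load), so it raises IndexError
-- whenever updated_load is shorter than status_load; Pre_ excludes exactly those inputs.
def Pre_get_influence_length (status_load : List Int) (updated_load : List Int) : Prop :=
  status_load.length ≤ updated_load.length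
instance (status_load : List Int) (updated_load : List Int) : Decidable (Pre_get_influence_length status_load updated_load) := by unfold Pre_get_influence_length; infer_instance
def pvWitness_get_influence_length : List Int × List Int := ([1, 2, 2], [1, 3, 2])

def Spec_get_influence_length (status_load : List Int) (updated_load : List Int) (out : List Int × (List (Int × Int))) : Prop := out = get_influence_length_alt status_load updated_load
instance (status_load : List Int) (updated_load : List Int) (out : List Int × (List (Int × Int))) : Decidable (Spec_get_influence_length status_load updated_load out) := by unfold Spec_get_influence_length; infer_instance

-- ===== CLAIM (what is proved, stated in full; the proofs are below) =====
def Claim_equal_get_influence_length : Prop := ∀ (status_load : List Int) (updated_load : List Int), Dom_get_influence_length status_load updated_load → Pre_get_influence_length status_load updated_load → Spec_get_influence_length status_load updated_load (get_influence_length status_load updated_load)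

-- ===== LEMMAS AND PROOFS =====

-- enough fuel: the result does not depend on the fuel once it covers the list length
theorem pvScanRunsF_congr (m : Nat) :
    ∀ (mask : List Bool), mask.length ≤ m → ∀ (f g : Nat) (i : Int),
      mask.length ≤ f → mask.length ≤ g → pvScanRunsF f i mask = pvScanRunsF g i mask := by
  induction m with
  | zero =>
    intro mask hm f g i hf hg
    have : mask = [] := List.length_eq_zero_iff.mp (Nat.le_zero.mp hm)
    subst this
    cases f <;> cases g <;> simp [pvScanRunsF]
  | succ m ih =>
    intro mask hm f g i hf hg
    match mask with
    | [] => cases f <;> cases g <;> simp [pvScanRunsF]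
    | b :: rest =>
      match f, g with
      | f + 1, g + 1 =>
        cases b with
        | false =>
          simp only [pvScanRunsF]
          exact ih rest (by simpa using Nat.succ_le_succ_iff.mp hm) f g (i + 1)
            (by simpa using hf) (by simpa using hg)
        | true =>
          simp only [pvScanRunsF]
          have hlen : (rest.drop ((rest.takeWhile id).length + 1)).length ≤ rest.length := by
            simp
          have hr : rest.length ≤ m := by simpa using Nat.succ_le_succ_iff.mp hm
          rw [ih (rest.drop ((rest.takeWhile id).length + 1)) (le_trans hlen hr) f
            ((rest.drop ((rest.takeWhile id).length + 1)).length) _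
            (le_trans hlen (by simpa using hf)) le_rfl,
            ih (rest.drop ((rest.takeWhile id).length + 1)) (le_trans hlen hr) g
            ((rest.drop ((rest.takeWhile id).length + 1)).length) _
            (le_trans hlen (by simpa using hg)) le_rfl]

theorem pvScanRuns_nil (i : Int) : pvScanRuns i [] = [] := rfl

theorem pvScanRuns_false (i : Int) (rest : List Bool) :
    pvScanRuns i (false :: rest) = pvScanRuns (i + 1) rest := rfl

theorem pvScanRuns_true (i : Int) (rest : List Bool) :
    pvScanRuns i (true :: rest) =
      (i, i + (rest.takeWhile id).length) ::
        pvScanRuns (i + (rest.takeWhile id).length + 2)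
          (rest.drop ((rest.takeWhile id).length + 1)) := by
  show (i, i + ((rest.takeWhile id).length : Int)) :: pvScanRunsF rest.length _ _ = _
  rw [pvScanRuns, pvScanRunsF_congr (rest.length) (rest.drop ((rest.takeWhile id).length + 1))
    (by simp) rest.length ((rest.drop ((rest.takeWhile id).length + 1)).length) _ (by simp) le_rfl]

-- A's state machine, re-expressed directly over the mask list (i = absolute index of head)
def pvMSim : Int → Option Int → List (Int × Int) → List Bool → List (Int × Int)
  | i, start, acc, [] =>
    match start with
    | none => acc
    | some s0 => acc ++ [(s0, i - 1)]
  | i, start, acc, b :: rest =>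
    if b then
      pvMSim (i + 1) (match start with | none => some i | some s0 => some s0) acc rest
    else
      match start with
      | none => pvMSim (i + 1) none acc rest
      | some s0 => pvMSim (i + 1) none (acc ++ [(s0, i - 1)]) rest

-- the state machine equals the run scan (proved jointly for both states)
theorem pvMSim_eq_scan (m : Nat) :
    ∀ mask : List Bool, mask.length ≤ m →
      (∀ (i : Int) (acc : List (Int × Int)),
          pvMSim i none acc mask = acc ++ pvScanRuns i mask) ∧
      (∀ (j s0 : Int) (acc : List (Int × Int)),
          pvMSim j (some s0) acc mask =
            acc ++ (s0, j + (mask.takeWhile id).length - 1) ::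
              pvScanRuns (j + (mask.takeWhile id).length + 1)
                (mask.drop ((mask.takeWhile id).length + 1))) := by
  induction m with
  | zero =>
    intro mask hm
    have : mask = [] := List.length_eq_zero_iff.mp (Nat.le_zero.mp hm)
    subst this
    constructor
    · intro i acc; simp [pvMSim, pvScanRuns_nil]
    · intro j s0 acc; simp [pvMSim, pvScanRuns_nil]
  | succ m ih =>
    intro mask hm
    match mask with
    | [] =>
      constructor
      · intro i acc; simp [pvMSim, pvScanRuns_nil]
      · intro j s0 acc; simp [pvMSim, pvScanRuns_nil]
    | b :: rest =>
      have hr : rest.length ≤ m := by simpa using Nat.succ_le_succ_iff.mp hm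
      constructor
      · intro i acc
        cases b with
        | false =>
          show pvMSim (i + 1) none acc rest = acc ++ pvScanRuns i (false :: rest)
          rw [(ih rest hr).1, pvScanRuns_false]
        | true =>
          show pvMSim (i + 1) (some i) acc rest = acc ++ pvScanRuns i (true :: rest)
          rw [(ih rest hr).2, pvScanRuns_true]
          simp
          ring_nf
          exact ⟨trivial, trivial⟩
      · intro j s0 acc
        cases b with
        | false =>
          show pvMSim (j + 1) none (acc ++ [(s0, j - 1)]) rest = _
          rw [(ih rest hr).1]
          simp [List.takeWhile]
        | true =>
          show pvMSim (j + 1) (some s0) acc rest = _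
          rw [(ih rest hr).2]
          simp [List.takeWhile]
          ring_nf
          exact ⟨trivial, trivial⟩

-- A's fold over the index range equals the state machine over the mask suffix
theorem pvFold_eq_msim (s u : List Int) (hpre : s.length ≤ u.length) :
    ∀ (d : Nat) (j : Nat), j + d = s.length →
      ∀ (st : Option Int) (acc : List (Int × Int)),
        (let res := (PySem.List.pyRange (j : Int) (s.length : Int) 1).foldl (pvAStep s u) (st, acc)
         match res.1 with
         | none => res.2
         | some s0 => res.2 ++ [(s0, (s.length : Int) - 1)]) =
        pvMSim (j : Int) st acc
          (((List.zip s u).map (fun p => decide (p.1 ≠ p.2))).drop j) := by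
  intro d
  induction d with
  | zero =>
    intro j hj st acc
    have hj' : (j : Int) = (s.length : Int) := by omega
    rw [hj', PySem.List.pyRange_one_eq_nil (le_refl _)]
    have hlen : ((List.zip s u).map (fun p => decide (p.1 ≠ p.2))).length = s.length := by
      simp [List.length_zip]; omega
    rw [List.drop_eq_nil_of_le (by omega)]
    cases st <;> simp [pvMSim]
  | succ d ihd =>
    intro j hj st acc
    have hjlt : j < s.length := by omega
    have hcons : PySem.List.pyRange (j : Int) (s.length : Int) 1
        = (j : Int) :: PySem.List.pyRange ((j : Int) + 1) (s.length : Int) 1 :=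
      PySem.List.pyRange_one_cons (by exact_mod_cast hjlt)
    have hjz : j < (List.zip s u).length := by simp [List.length_zip]; omega
    have hmask : (((List.zip s u).map (fun p => decide (p.1 ≠ p.2))).drop j)
        = decide (s[j]'hjlt ≠ u[j]'(by omega)) ::
          (((List.zip s u).map (fun p => decide (p.1 ≠ p.2))).drop (j + 1)) := by
      rw [List.drop_eq_getElem_cons (by simp [List.length_zip]; omega)]
      simp [List.getElem_zip]
    have hs : PySem.List.pyGet? s (j : Int) = some (s[j]'hjlt) :=
      PySem.List.pyGet?_ofNat s j hjlt
    have hu : PySem.List.pyGet? u (j : Int) = some (u[j]'(by omega)) :=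
      PySem.List.pyGet?_ofNat u j (by omega)
    have hstep : pvAStep s u (st, acc) (j : Int) =
        (if s[j]'hjlt ≠ u[j]'(by omega) then
          (match st with | none => (some (j : Int), acc) | some s0 => (some s0, acc))
        else
          match st with
          | none => (st, acc)
          | some s0 => (none, acc ++ [(s0, (j : Int) - 1)])) := by
      simp only [pvAStep, hs, hu, Option.getD_some]
    rw [hcons]
    rw [List.foldl_cons]
    rw [hmask]
    rw [hstep]
    have hcast : ((j : Int) + 1) = ((j + 1 : Nat) : Int) := by push_cast; ring
    by_cases hne : s[j]'hjlt ≠ u[j]'(by omega)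
    · rw [if_pos hne]
      simp only [pvMSim, decide_eq_true_eq]
      rw [if_pos hne]
      cases st with
      | none =>
        have ih := ihd (j + 1) (by omega) (some (j : Int)) acc
        rw [hcast]; exact ih
      | some s0 =>
        have ih := ihd (j + 1) (by omega) (some s0) acc
        rw [hcast]; exact ih
    · rw [if_neg hne]
      simp only [pvMSim, decide_eq_true_eq]
      rw [if_neg hne]
      cases st with
      | none =>
        have ih := ihd (j + 1) (by omega) none acc
        rw [hcast]; exact ih
      | some s0 =>
        have ih := ihd (j + 1) (by omega) none (acc ++ [(s0, (j : Int) - 1)])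
        rw [hcast]; exact ih

-- ===== VERDICT (by name: the statement is the Claim_ definition above) =====
theorem get_influence_length_spec : Claim_equal_get_influence_length := by
  intro s u _hdom hpre
  unfold Spec_get_influence_length get_influence_length get_influence_length_alt
  have h := pvFold_eq_msim s u hpre s.length 0 (by omega) none []
  simp only [Nat.cast_zero, List.drop_zero] at h
  have h2 := (pvMSim_eq_scan (((List.zip s u).map (fun p => decide (p.1 ≠ p.2))).length)
      ((List.zip s u).map (fun p => decide (p.1 ≠ p.2))) le_rfl).1 0 []
  simp only [List.nil_append] at h2
  simp only [h, h2]
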